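-- pv_equiv track=rewrite | github.com/jdpatt/AoC | 2018/day_5.py | reduce_polymer
-- ===== SOURCE A (Python) =====
-- def is_reactive(unit_a, unit_b):
--     """If the units are reactive return true."""
--     return unit_a == unit_b.swapcase()
--
-- def reduce_polymer(polymer):
--     """Remove all reactive elements."""
--     reduced = []
--     for unit in polymer:
--         if reduced and is_reactive(unit, reduced[-1]):
--             reduced.pop()
--         else:
--             reduced.append(unit)
--     return "".join(reduced)
-- ===== SOURCE B (Python) =====
-- def is_reactive(unit_a, unit_b):
--     """If the units are reactive return true."""
--     return unit_a == unit_b.swapcase()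
--
-- def reduce_polymer(polymer):
--     """Remove all reactive elements by repeated passes until stable."""
--     current = polymer
--     while True:
--         out = []
--         i = 0
--         while i < len(current):
--             if i + 1 < len(current) and is_reactive(current[i], current[i + 1]):
--                 i += 2  # drop this reactive pair
--             else:
--                 out.append(current[i])
--                 i += 1
--         new = "".join(out)
--         if new == current:
--             return current
--         current = new
-- ===== Notes on version B (the rewrite author's own statement) =====
-- stated objective: alternative
-- what changed: A does one linear stack pass (push each unit, pop when it reacts with the top); B instead repeatedly rescans the whole string, deleting all non-overlapping adjacent reactive pairs per pass, until a pass removes nothing — equivalence rests on confluence of the cancellation rewriting.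
import Mathlib
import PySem

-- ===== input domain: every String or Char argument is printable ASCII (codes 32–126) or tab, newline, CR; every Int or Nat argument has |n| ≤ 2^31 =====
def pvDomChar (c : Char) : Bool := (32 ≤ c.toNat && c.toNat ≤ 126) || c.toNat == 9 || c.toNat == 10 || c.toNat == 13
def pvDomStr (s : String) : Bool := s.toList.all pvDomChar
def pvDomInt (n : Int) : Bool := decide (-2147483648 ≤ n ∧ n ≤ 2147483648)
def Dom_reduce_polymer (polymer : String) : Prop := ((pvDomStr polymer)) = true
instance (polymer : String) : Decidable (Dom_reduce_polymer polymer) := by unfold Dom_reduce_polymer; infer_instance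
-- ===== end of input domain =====

-- B replaces A's single stack pass by repeated whole-string scans that drop the
-- non-overlapping reactive adjacent pairs until a pass removes nothing (objective:
-- alternative decomposition; not faster).

-- ===== PORT A =====
-- str.swapcase() on a 1-character string, exact on the ASCII domain.
def pvSwapcase (c : Char) : Char :=
  if 97 ≤ c.toNat ∧ c.toNat ≤ 122 then Char.ofNat (c.toNat - 32)
  else if 65 ≤ c.toNat ∧ c.toNat ≤ 90 then Char.ofNat (c.toNat + 32)
  else c

def is_reactive (unit_a unit_b : Char) : Bool := unit_a == pvSwapcase unit_b

-- one iteration of A's for-loop body (reduced[-1] = getLast?, pop = dropLast, append)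
def pvStepA (reduced : List Char) (unit : Char) : List Char :=
  match reduced.getLast? with
  | some top => if is_reactive unit top then reduced.dropLast else reduced ++ [unit]
  | none => reduced ++ [unit]

def reduce_polymer (polymer : String) : String :=
  String.mk (polymer.toList.foldl pvStepA [])

-- ===== PORT B =====
-- B's inner scan: walk left to right, dropping each reactive adjacent pair it meets.
def pvOnePass : List Char → List Char
  | [] => []
  | [x] => [x]
  | a :: b :: t => if is_reactive a b then pvOnePass t else a :: pvOnePass (b :: t)

theorem pvOnePass_length_le : ∀ l : List Char, (pvOnePass l).length ≤ l.length := by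
  intro l
  induction l using pvOnePass.induct with
  | case1 => simp [pvOnePass]
  | case2 => simp [pvOnePass]
  | case3 a b t h ih => simp [pvOnePass, h]; omega
  | case4 a b t h ih => simp [pvOnePass, h] at ih ⊢; omega

theorem pvOnePass_length_lt : ∀ l : List Char, pvOnePass l ≠ l → (pvOnePass l).length < l.length := by
  intro l
  induction l using pvOnePass.induct with
  | case1 => simp [pvOnePass]
  | case2 => simp [pvOnePass]
  | case3 a b t h ih =>
      intro _
      have := pvOnePass_length_le t
      simp [pvOnePass, h]; omega
  | case4 a b t h ih =>
      intro hne
      simp [pvOnePass, h] at hne ⊢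
      have : pvOnePass (b :: t) ≠ b :: t := by
        intro he; exact hne (by simp [he])
      have := ih this
      simp at this; omega

-- B's outer while-True loop: repeat the scan until it removes nothing.
def pvFix (l : List Char) : List Char :=
  if h : pvOnePass l = l then l else pvFix (pvOnePass l)
termination_by l.length
decreasing_by exact pvOnePass_length_lt l h

def reduce_polymer_alt (polymer : String) : String :=
  String.mk (pvFix polymer.toList)

-- ===== PRECONDITION & SPEC =====
def Spec_reduce_polymer (polymer : String) (out : String) : Prop := out = reduce_polymer_alt polymer
instance (polymer : String) (out : String) : Decidable (Spec_reduce_polymer polymer out) := by unfold Spec_reduce_polymer; infer_instance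

-- ===== CLAIM (what is proved, stated in full; the proofs are below) =====
def Claim_equal_reduce_polymer : Prop := ∀ (polymer : String), Dom_reduce_polymer polymer → Spec_reduce_polymer polymer (reduce_polymer polymer)

-- ===== LEMMAS AND PROOFS =====

theorem pvToNat_ofNat_small (n : Nat) (h : n < 55296) : (Char.ofNat n).toNat = n := by
  rw [Char.toNat_ofNat, if_pos (Or.inl h)]

theorem pvChar_ext {a b : Char} (h : a.toNat = b.toNat) : a = b := by
  have hv : a.val = b.val := UInt32.toNat_inj.mp h
  cases a; cases b
  simp only at hv
  subst hv; rfl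

theorem pvSwapcase_swapcase (c : Char) : pvSwapcase (pvSwapcase c) = c := by
  by_cases h1 : 97 ≤ c.toNat ∧ c.toNat ≤ 122
  · have ht : (pvSwapcase c).toNat = c.toNat - 32 := by
      rw [pvSwapcase, if_pos h1, pvToNat_ofNat_small _ (by omega)]
    rw [pvSwapcase, ht, if_neg (by omega), if_pos (by omega)]
    apply pvChar_ext
    rw [pvToNat_ofNat_small _ (by omega)]; omega
  · by_cases h2 : 65 ≤ c.toNat ∧ c.toNat ≤ 90
    · have ht : (pvSwapcase c).toNat = c.toNat + 32 := by
        rw [pvSwapcase, if_neg h1, if_pos h2, pvToNat_ofNat_small _ (by omega)]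
      rw [pvSwapcase, ht, if_pos (by omega)]
      apply pvChar_ext
      rw [pvToNat_ofNat_small _ (by omega)]; omega
    · have he : pvSwapcase c = c := by rw [pvSwapcase, if_neg h1, if_neg h2]
      rw [he, he]

theorem is_reactive_symm (a b : Char) : is_reactive a b = is_reactive b a := by
  unfold is_reactive
  by_cases h : a = pvSwapcase b
  · have h2 : b = pvSwapcase a := by rw [h, pvSwapcase_swapcase]
    rw [← h, ← h2]; simp
  · have h2 : b ≠ pvSwapcase a := fun he => h (by rw [he, pvSwapcase_swapcase])
    simp [h, h2]

-- the irreducibility invariant: no adjacent reactive pair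
def pvIrred (l : List Char) : Prop := List.IsChain (fun x y => is_reactive y x = false) l

theorem pvStepA_irred {s : List Char} (hs : pvIrred s) (u : Char) : pvIrred (pvStepA s u) := by
  unfold pvStepA
  cases hlast : s.getLast? with
  | none =>
      have : s = [] := by simpa using List.getLast?_eq_none_iff.mp hlast
      subst this; simp [pvIrred]
  | some top =>
      by_cases hr : is_reactive u top = true
      · simp [hr]
        exact List.IsChain.dropLast hs
      · simp [hr]
        unfold pvIrred at hs ⊢
        rw [List.isChain_append]
        refine ⟨hs, List.isChain_singleton _, ?_⟩
        intro x hx y hy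
        simp at hy; subst hy
        rw [hlast] at hx; simp at hx; subst hx
        simpa using hr

def pvRun (s l : List Char) : List Char := l.foldl pvStepA s

theorem pvRun_pair_cancel {s : List Char} (hs : pvIrred s) {a b : Char}
    (hr : is_reactive a b = true) (t : List Char) :
    pvRun s (a :: b :: t) = pvRun s t := by
  have hb : b = pvSwapcase a := by
    have : a = pvSwapcase b := by simpa [is_reactive] using hr
    rw [this, pvSwapcase_swapcase]
  suffices h : pvStepA (pvStepA s a) b = s by
    simp [pvRun, List.foldl, h]
  cases hlast : s.getLast? with
  | none =>
      have hse : s = [] := by simpa using List.getLast?_eq_none_iff.mp hlast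
      subst hse
      have hba : is_reactive b a = true := (is_reactive_symm a b) ▸ hr
      simp [pvStepA, hba]
  | some top =>
      by_cases hat : is_reactive a top = true
      · -- a pops top; then b = swapcase a = top is pushed back
        have htop : top = b := by
          have : a = pvSwapcase top := by simpa [is_reactive] using hat
          rw [hb, this, pvSwapcase_swapcase]
        have hsplit : s = s.dropLast ++ [top] := by
          symm; exact List.dropLast_append_getLast? _ hlast
        simp only [pvStepA, hlast, hat, if_pos]
        cases hlast2 : s.dropLast.getLast? with
        | none =>
            have hdl : s.dropLast = [] := by simpa using List.getLast?_eq_none_iff.mp hlast2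
            rw [hsplit, hdl]; simp [pvStepA, htop]
        | some p =>
            -- irreducibility of s: the element below top does not react with b = top
            have hdsplit : s.dropLast = s.dropLast.dropLast ++ [p] :=
              (List.dropLast_append_getLast? _ hlast2).symm
            have hchain : pvIrred (s.dropLast.dropLast ++ [p] ++ [top]) := by
              rw [← hdsplit, ← hsplit]; exact hs
            have hpt : is_reactive top p = false := by
              unfold pvIrred at hchain
              rw [List.isChain_append] at hchain
              exact hchain.2.2 p (by simp) top (by simp)
            have hbp : is_reactive b p = false := htop ▸ hpt
            simp only [pvStepA, hlast2, hbp, Bool.false_eq_true, if_false]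
            rw [← htop, ← hsplit]
      · -- a is pushed; then b = swapcase a pops it
        have hba : is_reactive b a = true := (is_reactive_symm a b) ▸ hr
        simp [pvStepA, hlast, hat, hba]

theorem pvRun_onePass (l : List Char) : ∀ s : List Char, pvIrred s →
    pvRun s (pvOnePass l) = pvRun s l := by
  induction l using pvOnePass.induct with
  | case1 => intro s _; simp [pvOnePass]
  | case2 x => intro s _; simp [pvOnePass]
  | case3 a b t h ih =>
      intro s hs
      rw [pvOnePass, if_pos h, ih s hs, pvRun_pair_cancel hs h]
  | case4 a b t h ih =>
      intro s hs
      rw [pvOnePass, if_neg (by simp [h])]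
      show pvRun (pvStepA s a) (pvOnePass (b :: t)) = _
      rw [ih (pvStepA s a) (pvStepA_irred hs a)]
      rfl

theorem pvRun_fix (l : List Char) : ∀ s : List Char, pvIrred s →
    pvRun s (pvFix l) = pvRun s l := by
  induction l using pvFix.induct with
  | case1 l h => intro s _; rw [pvFix, dif_pos h]
  | case2 l h ih =>
      intro s hs
      rw [pvFix, dif_neg h, ih s hs, pvRun_onePass l s hs]

theorem pvOnePass_fix (l : List Char) : pvOnePass (pvFix l) = pvFix l := by
  induction l using pvFix.induct with
  | case1 l h => rw [pvFix, dif_pos h]; exact h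
  | case2 l h ih => rw [pvFix, dif_neg h]; exact ih

theorem pvOnePass_fixed_irred : ∀ l : List Char, pvOnePass l = l → pvIrred l := by
  intro l
  induction l using pvOnePass.induct with
  | case1 => intro _; simp [pvIrred]
  | case2 x => intro _; simp [pvIrred]
  | case3 a b t h ih =>
      intro he
      rw [pvOnePass, if_pos h] at he
      have := pvOnePass_length_le t
      have : (pvOnePass t).length = t.length + 2 := by rw [he]; simp
      omega
  | case4 a b t h ih =>
      intro he
      rw [pvOnePass, if_neg (by simp [h])] at he
      simp at he
      have hc := ih he
      unfold pvIrred at hc ⊢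
      cases t with
      | nil => simpa using List.IsChain.singleton _ |>.cons (by simpa using (is_reactive_symm a b) ▸ (Bool.not_eq_true _ ▸ h : is_reactive a b = false))
      | cons c t => exact List.isChain_cons_cons.mpr ⟨by simpa using (is_reactive_symm a b) ▸ (Bool.not_eq_true _ ▸ h : is_reactive a b = false), hc⟩

theorem pvRun_irred (l : List Char) : ∀ s : List Char,
    List.IsChain (fun x y => is_reactive y x = false) (s ++ l) → pvRun s l = s ++ l := by
  induction l with
  | nil => intro s _; simp [pvRun]
  | cons u t ih =>
      intro s hc
      have hstep : pvStepA s u = s ++ [u] := by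
        unfold pvStepA
        cases hlast : s.getLast? with
        | none => rfl
        | some top =>
            have hsplit : s = s.dropLast ++ [top] := (List.dropLast_append_getLast? _ hlast).symm
            have hcc : List.IsChain (fun x y => is_reactive y x = false)
                (s.dropLast ++ [top] ++ (u :: t)) := by rw [← hsplit]; exact hc
            rw [List.isChain_append] at hcc
            have hut : is_reactive u top = false := hcc.2.2 top (by simp) u (by simp)
            simp [hut]
      show pvRun (pvStepA s u) t = _
      rw [hstep, ih (s ++ [u]) (by simpa using hc)]
      simp

-- ===== VERDICT (by name: the statement is the Claim_ definition above) =====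
theorem reduce_polymer_spec : Claim_equal_reduce_polymer := by
  intro polymer _
  unfold Spec_reduce_polymer reduce_polymer reduce_polymer_alt
  set L := polymer.toList with hL
  have hirred : pvIrred (pvFix L) := pvOnePass_fixed_irred _ (pvOnePass_fix L)
  have h1 : pvRun [] (pvFix L) = pvFix L := by
    have := pvRun_irred (pvFix L) []
    simpa [pvIrred] using this (by simpa [pvIrred] using hirred)
  have h2 : pvRun [] (pvFix L) = pvRun [] L := pvRun_fix L [] (by simp [pvIrred])
  show String.mk (L.foldl pvStepA []) = String.mk (pvFix L)
  rw [show L.foldl pvStepA [] = pvRun [] L from rfl, ← h2, h1]
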